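-- pv_equiv track=rewrite | github.com/omriyakir21/UBDModel | cath.py | divideClusters
-- ===== SOURCE A (Python) =====
-- def divideClusters(clusterSizes):
--     """
--     :param clusterSizes: list of tuples (clusterIndex,size)
--     :return:  sublists,sublistsSum
--     divide the list into 5 sublists such that the sum of each cluster sizes in the sublist is as close as possible
--     """
--     sublists = [[] for i in range(5)]
--     sublistsSum = [0 for i in range(5)]
--     clusterSizes.sort(reverse=True, key=lambda x: x[1])  # Sort the clusters by size descending order.
--     for tup in clusterSizes:
--         min_cluster_index = sublistsSum.index(min(sublistsSum))  # find the cluster with the minimal sum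
--         sublistsSum[min_cluster_index] += tup[1]
--         sublists[min_cluster_index].append(tup[0])
--     return sublists, sublistsSum
-- ===== SOURCE B (Python) =====
-- def _insert(e, es):
--     """Insert tuple e into lexicographically ascending-sorted list es, keeping it sorted."""
--     if not es or e < es[0]:
--         return [e] + es
--     return [es[0]] + _insert(e, es[1:])
--
--
-- def divideClusters(clusterSizes):
--     """
--     :param clusterSizes: list of tuples (clusterIndex,size)
--     :return:  sublists,sublistsSum
--     Priority-queue greedy: keep the five bins as a sorted list of (runningSum, binIndex)
--     entries; each cluster goes to the entry at the head (minimal sum, lowest index on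
--     ties, by tuple order), which is then re-inserted at its sorted position.  Bin
--     contents live in a dict keyed by bin index; the five positional outputs are
--     reassembled at the end.
--     """
--     clusterSizes.sort(reverse=True, key=lambda x: x[1])
--     entries = [(0, i) for i in range(5)]          # ascending (sum, binIndex)
--     bins = {i: [] for i in range(5)}
--     for clusterIndex, size in clusterSizes:
--         total, i = entries[0]
--         bins[i].append(clusterIndex)
--         entries = _insert((total + size, i), entries[1:])
--     sums_by_index = sorted(entries, key=lambda e: e[1])
--     return [bins[i] for i in range(5)], [total for total, i in sums_by_index]
-- ===== Notes on version B (the rewrite author's own statement) =====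
-- stated objective: alternative
-- what changed: B replaces A's five-slot array with min()/index() scans by a priority queue: a sorted list of (sum, binIndex) entries whose head is popped and re-inserted in order each step, with bin contents in a dict reassembled positionally at the end.
import Mathlib
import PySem

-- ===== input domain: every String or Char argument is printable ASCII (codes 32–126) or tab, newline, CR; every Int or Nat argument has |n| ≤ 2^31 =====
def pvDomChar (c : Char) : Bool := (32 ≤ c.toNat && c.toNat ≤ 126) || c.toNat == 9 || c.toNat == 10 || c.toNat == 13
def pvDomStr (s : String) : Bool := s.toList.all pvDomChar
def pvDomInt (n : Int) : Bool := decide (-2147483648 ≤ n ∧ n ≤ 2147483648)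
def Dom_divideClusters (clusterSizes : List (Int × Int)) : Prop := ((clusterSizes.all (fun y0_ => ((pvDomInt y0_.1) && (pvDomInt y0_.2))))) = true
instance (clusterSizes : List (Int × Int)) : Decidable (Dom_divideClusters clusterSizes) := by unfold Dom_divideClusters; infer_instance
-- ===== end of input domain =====

-- B replaces A's five-slot array with its per-element min()/index() scans by a priority queue:
-- a sorted list of (sum, binIndex) entries popped at the head and re-inserted in order, with bin
-- contents kept in a dict and the positional outputs reassembled at the end (objective: alternative).
-- Both A and B sort the clusterSizes argument in place; the equivalence proved here is about the return value.

-- ===== PORT A =====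
-- one iteration of A's for-loop: state = (sublists, sublistsSum)
def pvStepA (st : List (List Int) × List Int) (tup : Int × Int) : List (List Int) × List Int :=
  match PySem.List.min? st.2 (fun y => y) with
  | none => st  -- unreachable: sublistsSum always has 5 elements
  | some m =>
    match PySem.List.index? st.2 m with
    | none => st  -- unreachable: m ∈ sublistsSum
    | some k =>
      (PySem.List.pySetD st.1 (k : Int) (PySem.List.pyGetD st.1 (k : Int) [] ++ [tup.1]),
       PySem.List.pySetD st.2 (k : Int) (PySem.List.pyGetD st.2 (k : Int) 0 + tup.2))

def divideClusters (clusterSizes : List (Int × Int)) : List (List Int) × List Int :=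
  (PySem.List.sorted clusterSizes (fun x => x.2) true).foldl pvStepA
    ([[], [], [], [], []], [0, 0, 0, 0, 0])

-- ===== PORT B =====
-- Python tuple '<' on pairs of ints (lexicographic comparison; exact for int pairs)
def pvLtTup (a b : Int × Int) : Bool := a.1 < b.1 || (a.1 == b.1 && a.2 < b.2)

-- _insert: insert e into an ascending-sorted list, keeping it sorted
def pvInsert (e : Int × Int) : List (Int × Int) → List (Int × Int)
  | [] => [e]
  | h :: t => if pvLtTup e h then e :: h :: t else h :: pvInsert e t

-- one iteration of B's for-loop: state = (entries, bins); entries[0] is taken at the head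
-- (entries always has 5 elements, so Python's entries[0] never raises; the [] branch is unreachable)
def pvStepB (st : List (Int × Int) × PySem.Dict Int (List Int)) (tup : Int × Int) :
    List (Int × Int) × PySem.Dict Int (List Int) :=
  match st.1 with
  | [] => st
  | (total, i) :: rest =>
      -- bins[i].append(clusterIndex): i is always a key of bins, so modify with default [] is exact
      (pvInsert (total + tup.2, i) rest, st.2.modify i [] (· ++ [tup.1]))

def divideClusters_alt (clusterSizes : List (Int × Int)) : List (List Int) × List Int :=
  let st := (PySem.List.sorted clusterSizes (fun x => x.2) true).foldl pvStepB
    ((PySem.List.pyRange 0 5 1).map (fun i => ((0 : Int), i)),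
     (PySem.List.pyRange 0 5 1).foldl (fun d i => d.insert i ([] : List Int)) PySem.Dict.empty)
  let sumsByIndex := PySem.List.sorted st.1 (fun e => e.2) false
  -- bins[i] in the comprehension: i ∈ range(5) is always a key of bins, so getD is exact
  ((PySem.List.pyRange 0 5 1).map (fun i => st.2.getD i []), sumsByIndex.map (fun e => e.1))

-- ===== PRECONDITION & SPEC =====
def Spec_divideClusters (clusterSizes : List (Int × Int)) (out : List (List Int) × List Int) : Prop := out = divideClusters_alt clusterSizes
instance (clusterSizes : List (Int × Int)) (out : List (List Int) × List Int) : Decidable (Spec_divideClusters clusterSizes out) := by unfold Spec_divideClusters; infer_instance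

-- ===== CLAIM (what is proved, stated in full; the proofs are below) =====
def Claim_equal_divideClusters : Prop := ∀ (clusterSizes : List (Int × Int)), Dom_divideClusters clusterSizes → Spec_divideClusters clusterSizes (divideClusters clusterSizes)

-- ===== LEMMAS AND PROOFS =====
-- Prop form of the lexicographic tuple order
def pvLtP (a b : Int × Int) : Prop := a.1 < b.1 ∨ (a.1 = b.1 ∧ a.2 < b.2)

-- coupling invariant: A's state is five positional lists/sums; B's entries are a sorted
-- permutation of the (sum, index) pairs and B's dict holds the five lists keyed by index
def pvInv (stA : List (List Int) × List Int) (stB : List (Int × Int) × PySem.Dict Int (List Int)) : Prop :=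
  ∃ l0 l1 l2 l3 l4 s0 s1 s2 s3 s4,
    stA = ([l0, l1, l2, l3, l4], [s0, s1, s2, s3, s4]) ∧
    stB.1.Perm [(s0, 0), (s1, 1), (s2, 2), (s3, 3), (s4, 4)] ∧
    stB.1.Pairwise pvLtP ∧
    stB.2 = PySem.Dict.mk [(0, l0), (1, l1), (2, l2), (3, l3), (4, l4)]

lemma pvInsert_perm (e : Int × Int) (l : List (Int × Int)) : (pvInsert e l).Perm (e :: l) := by
  induction l with
  | nil => simp [pvInsert]
  | cons h t ih =>
    simp only [pvInsert]
    split
    · exact List.Perm.refl _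
    · exact ((ih.cons h).trans (List.Perm.swap e h t))

lemma pvInsert_pairwise (e : Int × Int) (l : List (Int × Int))
    (hs : l.Pairwise pvLtP) (hne : ∀ p ∈ l, p.2 ≠ e.2) :
    (pvInsert e l).Pairwise pvLtP := by
  induction l with
  | nil => simp [pvInsert, List.pairwise_cons]
  | cons h t ih =>
    rcases List.pairwise_cons.mp hs with ⟨hh, ht⟩
    simp only [pvInsert]
    split
    · rename_i hlt
      have hlt' : pvLtP e h := by
        simp only [pvLtTup, Bool.or_eq_true, Bool.and_eq_true, decide_eq_true_eq,
          beq_iff_eq] at hlt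
        unfold pvLtP; omega
      refine List.pairwise_cons.mpr ⟨?_, hs⟩
      intro p hp
      rcases List.mem_cons.mp hp with rfl | hp'
      · exact hlt'
      · have h2 := hh p hp'
        unfold pvLtP at hlt' h2 ⊢; omega
    · rename_i hnlt
      refine List.pairwise_cons.mpr ⟨?_, ih ht (fun p hp => hne p (List.mem_cons_of_mem _ hp))⟩
      intro p hp
      have hp' := (pvInsert_perm e t).mem_iff.mp hp
      rcases List.mem_cons.mp hp' with rfl | hp''
      · have hne' := hne h (List.mem_cons_self)
        simp only [pvLtTup, Bool.or_eq_true, Bool.and_eq_true, decide_eq_true_eq, beq_iff_eq,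
          not_or, not_and] at hnlt
        unfold pvLtP
        omega
      · exact hh p hp''

-- one loop iteration preserves the coupling invariant (five symmetric cases, one per bin)
lemma pvStep_inv (stA : List (List Int) × List Int)
    (stB : List (Int × Int) × PySem.Dict Int (List Int)) (t : Int × Int)
    (h : pvInv stA stB) : pvInv (pvStepA stA t) (pvStepB stB t) := by
  obtain ⟨l0, l1, l2, l3, l4, s0, s1, s2, s3, s4, hA, hperm, hsort, hdict⟩ := h
  obtain ⟨es, bins⟩ := stB
  simp only at hperm hsort hdict
  subst hA hdict
  match es, hperm, hsort with
  | [], hperm, _ => exact absurd (hperm.length_eq) (by simp)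
  | (m, j) :: rest, hperm, hsort =>
  rcases List.cons_perm_iff_perm_erase.mp hperm with ⟨hmem, hrest⟩
  have hP : ∀ p ∈ rest, pvLtP (m, j) p := (List.pairwise_cons.mp hsort).1
  have hrestP : rest.Pairwise pvLtP := (List.pairwise_cons.mp hsort).2
  simp only [List.mem_cons, List.not_mem_nil, or_false, Prod.mk.injEq] at hmem
  rcases hmem with ⟨rfl, rfl⟩ | ⟨rfl, rfl⟩ | ⟨rfl, rfl⟩ | ⟨rfl, rfl⟩ | ⟨rfl, rfl⟩
  -- case a = 0
  · have herase : ([(m, 0), (s1, 1), (s2, 2), (s3, 3), (s4, 4)] : List (Int × Int)).erase (m, 0)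
        = [(s1, 1), (s2, 2), (s3, 3), (s4, 4)] := by
      simp
    rw [herase] at hrest
    have h1 : pvLtP (m, 0) (s1, 1) := hP _ (hrest.mem_iff.mpr (by simp))
    have h2 : pvLtP (m, 0) (s2, 2) := hP _ (hrest.mem_iff.mpr (by simp))
    have h3 : pvLtP (m, 0) (s3, 3) := hP _ (hrest.mem_iff.mpr (by simp))
    have h4 : pvLtP (m, 0) (s4, 4) := hP _ (hrest.mem_iff.mpr (by simp))
    unfold pvLtP at h1 h2 h3 h4; simp only at h1 h2 h3 h4
    have hm : min (min (min (min m s1) s2) s3) s4 = m := by omega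
    refine ⟨l0 ++ [t.1], l1, l2, l3, l4, m + t.2, s1, s2, s3, s4, ?_, ?_, ?_, ?_⟩
    · simp only [pvStepA, PySem.List.min?_id_cons, List.foldl, hm]
      rw [PySem.List.index?_cons_self]
      simp [PySem.List.pySetD, PySem.List.pySet?, PySem.List.pyGetD, PySem.List.pyGet?,
        PySem.List.pyIdx?]
    · show (pvInsert (m + t.2, 0) rest).Perm _
      refine ((pvInsert_perm _ _).trans (hrest.cons _)).trans ?_
      exact List.Perm.refl _
    · show (pvInsert (m + t.2, 0) rest).Pairwise pvLtP
      refine pvInsert_pairwise _ _ hrestP ?_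
      intro p hp
      have := hrest.mem_iff.mp hp
      simp only [List.mem_cons, List.not_mem_nil, or_false] at this
      rcases this with rfl | rfl | rfl | rfl <;> simp
    · rfl
  -- case a = 1
  · have herase : ([(s0, 0), (m, 1), (s2, 2), (s3, 3), (s4, 4)] : List (Int × Int)).erase (m, 1)
        = [(s0, 0), (s2, 2), (s3, 3), (s4, 4)] := by
      simp
    rw [herase] at hrest
    have h0 : pvLtP (m, 1) (s0, 0) := hP _ (hrest.mem_iff.mpr (by simp))
    have h2 : pvLtP (m, 1) (s2, 2) := hP _ (hrest.mem_iff.mpr (by simp))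
    have h3 : pvLtP (m, 1) (s3, 3) := hP _ (hrest.mem_iff.mpr (by simp))
    have h4 : pvLtP (m, 1) (s4, 4) := hP _ (hrest.mem_iff.mpr (by simp))
    unfold pvLtP at h0 h2 h3 h4; simp only at h0 h2 h3 h4
    have hm : min (min (min (min s0 m) s2) s3) s4 = m := by omega
    have e0 : s0 ≠ m := by omega
    refine ⟨l0, l1 ++ [t.1], l2, l3, l4, s0, m + t.2, s2, s3, s4, ?_, ?_, ?_, ?_⟩
    · simp only [pvStepA, PySem.List.min?_id_cons, List.foldl, hm]
      rw [PySem.List.index?_cons_of_ne _ e0, PySem.List.index?_cons_self]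
      simp [PySem.List.pySetD, PySem.List.pySet?, PySem.List.pyGetD, PySem.List.pyGet?,
        PySem.List.pyIdx?]
    · show (pvInsert (m + t.2, 1) rest).Perm _
      refine ((pvInsert_perm _ _).trans (hrest.cons _)).trans ?_
      exact (List.perm_middle (l₁ := [(s0, 0)])).symm
    · show (pvInsert (m + t.2, 1) rest).Pairwise pvLtP
      refine pvInsert_pairwise _ _ hrestP ?_
      intro p hp
      have := hrest.mem_iff.mp hp
      simp only [List.mem_cons, List.not_mem_nil, or_false] at this
      rcases this with rfl | rfl | rfl | rfl <;> simp
    · rfl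
  -- case a = 2
  · have herase : ([(s0, 0), (s1, 1), (m, 2), (s3, 3), (s4, 4)] : List (Int × Int)).erase (m, 2)
        = [(s0, 0), (s1, 1), (s3, 3), (s4, 4)] := by
      simp
    rw [herase] at hrest
    have h0 : pvLtP (m, 2) (s0, 0) := hP _ (hrest.mem_iff.mpr (by simp))
    have h1 : pvLtP (m, 2) (s1, 1) := hP _ (hrest.mem_iff.mpr (by simp))
    have h3 : pvLtP (m, 2) (s3, 3) := hP _ (hrest.mem_iff.mpr (by simp))
    have h4 : pvLtP (m, 2) (s4, 4) := hP _ (hrest.mem_iff.mpr (by simp))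
    unfold pvLtP at h0 h1 h3 h4; simp only at h0 h1 h3 h4
    have hm : min (min (min (min s0 s1) m) s3) s4 = m := by omega
    have e0 : s0 ≠ m := by omega
    have e1 : s1 ≠ m := by omega
    refine ⟨l0, l1, l2 ++ [t.1], l3, l4, s0, s1, m + t.2, s3, s4, ?_, ?_, ?_, ?_⟩
    · simp only [pvStepA, PySem.List.min?_id_cons, List.foldl, hm]
      rw [PySem.List.index?_cons_of_ne _ e0, PySem.List.index?_cons_of_ne _ e1, PySem.List.index?_cons_self]
      simp [PySem.List.pySetD, PySem.List.pySet?, PySem.List.pyGetD, PySem.List.pyGet?,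
        PySem.List.pyIdx?]
    · show (pvInsert (m + t.2, 2) rest).Perm _
      refine ((pvInsert_perm _ _).trans (hrest.cons _)).trans ?_
      exact (List.perm_middle (l₁ := [(s0, 0), (s1, 1)])).symm
    · show (pvInsert (m + t.2, 2) rest).Pairwise pvLtP
      refine pvInsert_pairwise _ _ hrestP ?_
      intro p hp
      have := hrest.mem_iff.mp hp
      simp only [List.mem_cons, List.not_mem_nil, or_false] at this
      rcases this with rfl | rfl | rfl | rfl <;> simp
    · rfl
  -- case a = 3
  · have herase : ([(s0, 0), (s1, 1), (s2, 2), (m, 3), (s4, 4)] : List (Int × Int)).erase (m, 3)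
        = [(s0, 0), (s1, 1), (s2, 2), (s4, 4)] := by
      simp
    rw [herase] at hrest
    have h0 : pvLtP (m, 3) (s0, 0) := hP _ (hrest.mem_iff.mpr (by simp))
    have h1 : pvLtP (m, 3) (s1, 1) := hP _ (hrest.mem_iff.mpr (by simp))
    have h2 : pvLtP (m, 3) (s2, 2) := hP _ (hrest.mem_iff.mpr (by simp))
    have h4 : pvLtP (m, 3) (s4, 4) := hP _ (hrest.mem_iff.mpr (by simp))
    unfold pvLtP at h0 h1 h2 h4; simp only at h0 h1 h2 h4
    have hm : min (min (min (min s0 s1) s2) m) s4 = m := by omega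
    have e0 : s0 ≠ m := by omega
    have e1 : s1 ≠ m := by omega
    have e2 : s2 ≠ m := by omega
    refine ⟨l0, l1, l2, l3 ++ [t.1], l4, s0, s1, s2, m + t.2, s4, ?_, ?_, ?_, ?_⟩
    · simp only [pvStepA, PySem.List.min?_id_cons, List.foldl, hm]
      rw [PySem.List.index?_cons_of_ne _ e0, PySem.List.index?_cons_of_ne _ e1, PySem.List.index?_cons_of_ne _ e2, PySem.List.index?_cons_self]
      simp [PySem.List.pySetD, PySem.List.pySet?, PySem.List.pyGetD, PySem.List.pyGet?,
        PySem.List.pyIdx?]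
    · show (pvInsert (m + t.2, 3) rest).Perm _
      refine ((pvInsert_perm _ _).trans (hrest.cons _)).trans ?_
      exact (List.perm_middle (l₁ := [(s0, 0), (s1, 1), (s2, 2)])).symm
    · show (pvInsert (m + t.2, 3) rest).Pairwise pvLtP
      refine pvInsert_pairwise _ _ hrestP ?_
      intro p hp
      have := hrest.mem_iff.mp hp
      simp only [List.mem_cons, List.not_mem_nil, or_false] at this
      rcases this with rfl | rfl | rfl | rfl <;> simp
    · rfl
  -- case a = 4
  · have herase : ([(s0, 0), (s1, 1), (s2, 2), (s3, 3), (m, 4)] : List (Int × Int)).erase (m, 4)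
        = [(s0, 0), (s1, 1), (s2, 2), (s3, 3)] := by
      simp
    rw [herase] at hrest
    have h0 : pvLtP (m, 4) (s0, 0) := hP _ (hrest.mem_iff.mpr (by simp))
    have h1 : pvLtP (m, 4) (s1, 1) := hP _ (hrest.mem_iff.mpr (by simp))
    have h2 : pvLtP (m, 4) (s2, 2) := hP _ (hrest.mem_iff.mpr (by simp))
    have h3 : pvLtP (m, 4) (s3, 3) := hP _ (hrest.mem_iff.mpr (by simp))
    unfold pvLtP at h0 h1 h2 h3; simp only at h0 h1 h2 h3
    have hm : min (min (min (min s0 s1) s2) s3) m = m := by omega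
    have e0 : s0 ≠ m := by omega
    have e1 : s1 ≠ m := by omega
    have e2 : s2 ≠ m := by omega
    have e3 : s3 ≠ m := by omega
    refine ⟨l0, l1, l2, l3, l4 ++ [t.1], s0, s1, s2, s3, m + t.2, ?_, ?_, ?_, ?_⟩
    · simp only [pvStepA, PySem.List.min?_id_cons, List.foldl, hm]
      rw [PySem.List.index?_cons_of_ne _ e0, PySem.List.index?_cons_of_ne _ e1, PySem.List.index?_cons_of_ne _ e2, PySem.List.index?_cons_of_ne _ e3, PySem.List.index?_cons_self]
      simp [PySem.List.pySetD, PySem.List.pySet?, PySem.List.pyGetD, PySem.List.pyGet?,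
        PySem.List.pyIdx?]
    · show (pvInsert (m + t.2, 4) rest).Perm _
      refine ((pvInsert_perm _ _).trans (hrest.cons _)).trans ?_
      exact (List.perm_middle (l₁ := [(s0, 0), (s1, 1), (s2, 2), (s3, 3)])).symm
    · show (pvInsert (m + t.2, 4) rest).Pairwise pvLtP
      refine pvInsert_pairwise _ _ hrestP ?_
      intro p hp
      have := hrest.mem_iff.mp hp
      simp only [List.mem_cons, List.not_mem_nil, or_false] at this
      rcases this with rfl | rfl | rfl | rfl <;> simp
    · rfl

lemma pvFold_inv (cs : List (Int × Int)) :
    ∀ stA stB, pvInv stA stB → pvInv (cs.foldl pvStepA stA) (cs.foldl pvStepB stB) := by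
  induction cs with
  | nil => intro stA stB h; exact h
  | cons t ts ih => intro stA stB h; exact ih _ _ (pvStep_inv stA stB t h)

-- ===== VERDICT (by name: the statement is the Claim_ definition above) =====
theorem divideClusters_spec : Claim_equal_divideClusters := by
  intro cs _
  show divideClusters cs = divideClusters_alt cs
  unfold divideClusters divideClusters_alt
  have hinit : pvInv ([[], [], [], [], []], [0, 0, 0, 0, 0])
      ((PySem.List.pyRange 0 5 1).map (fun i => ((0 : Int), i)),
       (PySem.List.pyRange 0 5 1).foldl (fun d i => d.insert i ([] : List Int)) PySem.Dict.empty) := by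
    refine ⟨[], [], [], [], [], 0, 0, 0, 0, 0, rfl, ?_, ?_, rfl⟩
    · exact List.Perm.refl _
    · show ([((0:Int),(0:Int)), (0,1), (0,2), (0,3), (0,4)]).Pairwise pvLtP
      simp [List.pairwise_cons, pvLtP]
  have hfin := pvFold_inv (PySem.List.sorted cs (fun x => x.2) true) _ _ hinit
  obtain ⟨l0, l1, l2, l3, l4, s0, s1, s2, s3, s4, hA, hperm, hsort, hdict⟩ := hfin
  rw [hA]
  have hsorted : PySem.List.sorted
      ((PySem.List.sorted cs (fun x => x.2) true).foldl pvStepB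
        ((PySem.List.pyRange 0 5 1).map (fun i => ((0 : Int), i)),
         (PySem.List.pyRange 0 5 1).foldl (fun d i => d.insert i ([] : List Int)) PySem.Dict.empty)).1
      (fun e => e.2) false = [(s0, 0), (s1, 1), (s2, 2), (s3, 3), (s4, 4)] := by
    refine PySem.List.sorted_eq_of_perm_of_pairwise_lt _ _ _ hperm.symm ?_
    simp [List.pairwise_cons]
  simp only [hsorted, hdict, List.map]
  rfl
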